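-- pv_equiv track=rewrite | github.com/darakna/Playground | Pyton_stuff/Work/Test_injection.py | stripall
-- ===== SOURCE A (Python) =====
-- domain_char_list=list(range(1,127))
--
-- def stripall(word):
--     if word=="":
--         return ""
--     else:
--         if ord(word[0]) in domain_char_list:
--             return word[0]+stripall(word[1:])
--         else:
--              return stripall(word[1:])
-- ===== SOURCE B (Python) =====
-- def stripall(word):
--     return ''.join(c for c in word if 1 <= ord(c) <= 126)
-- ===== Notes on version B (the rewrite author's own statement) =====
-- stated objective: simpler
-- what changed: Replaced the head/tail recursion with a single iterative filter-and-join pass testing 1 <= ord(c) <= 126 directly instead of membership in a 126-element list.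
import Mathlib
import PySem

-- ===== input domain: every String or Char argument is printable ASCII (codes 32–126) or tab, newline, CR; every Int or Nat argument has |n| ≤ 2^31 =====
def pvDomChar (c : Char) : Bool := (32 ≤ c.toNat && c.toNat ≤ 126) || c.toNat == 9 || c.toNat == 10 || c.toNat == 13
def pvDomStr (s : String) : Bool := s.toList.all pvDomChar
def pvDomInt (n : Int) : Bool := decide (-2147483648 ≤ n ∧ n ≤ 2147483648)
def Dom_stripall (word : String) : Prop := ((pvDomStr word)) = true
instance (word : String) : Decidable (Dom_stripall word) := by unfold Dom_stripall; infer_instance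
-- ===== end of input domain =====

-- B replaces A's head/tail recursion (membership in list(range(1,127))) by a single filter-and-join pass; return value only.
-- ===== PORT A =====
def domain_char_list : List Int := PySem.List.pyRange 1 127 1

def stripallA : List Char → List Char
  | [] => []
  | c :: rest =>
    if (c.toNat : Int) ∈ domain_char_list then
      c :: stripallA rest
    else
      stripallA rest

def stripall (word : String) : String := String.mk (stripallA word.toList)

-- ===== PORT B =====
def stripall_alt (word : String) : String :=
  String.mk (word.toList.filter (fun c => 1 ≤ c.toNat && c.toNat ≤ 126))

-- ===== PRECONDITION & SPEC =====
def Spec_stripall (word : String) (out : String) : Prop := out = stripall_alt word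
instance (word : String) (out : String) : Decidable (Spec_stripall word out) := by unfold Spec_stripall; infer_instance

-- ===== CLAIM (what is proved, stated in full; the proofs are below) =====
def Claim_equal_stripall : Prop := ∀ (word : String), Dom_stripall word → Spec_stripall word (stripall word)

-- ===== LEMMAS AND PROOFS =====

-- ===== VERDICT (by name: the statement is the Claim_ definition above) =====
theorem mem_domain_iff (c : Char) :
    ((c.toNat : Int) ∈ domain_char_list) ↔ (1 ≤ c.toNat ∧ c.toNat ≤ 126) := by
  rw [domain_char_list, PySem.List.mem_pyRange_one]
  omega

theorem stripallA_eq_filter (l : List Char) :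
    stripallA l = l.filter (fun c => 1 ≤ c.toNat && c.toNat ≤ 126) := by
  induction l with
  | nil => rfl
  | cons c rest ih =>
    simp only [stripallA, List.filter_cons]
    by_cases h : 1 ≤ c.toNat ∧ c.toNat ≤ 126
    · rw [if_pos ((mem_domain_iff c).mpr h), ih]
      simp [h.1, h.2]
    · rw [if_neg (fun hm => h ((mem_domain_iff c).mp hm)), ih]
      simp only [Bool.and_eq_true, decide_eq_true_eq]
      rw [if_neg (by simpa using h)]

theorem stripall_spec : Claim_equal_stripall := by
  intro word _
  unfold Spec_stripall stripall stripall_alt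
  rw [stripallA_eq_filter]
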